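-- pv_equiv track=rewrite | github.com/remowxdx/AoC-2022 | aoc22.py | read_directions
-- ===== SOURCE A (Python) =====
-- def read_directions(directions_descr):
--     directions = []
--     direction = 0
--     steps = 0
--     i = 0
--     while i < len(directions_descr):
--         if directions_descr[i].isnumeric():
--             steps = steps * 10 + int(directions_descr[i])
--         else:
--             directions.append((steps, directions_descr[i]))
--             steps = 0
--         i += 1
--     directions.append((steps, "X"))
--     return directions
-- ===== SOURCE B (Python) =====
-- def read_directions(directions_descr):
--     # Run-based pass: split the string into maximal numeric / non-numeric runs.
--     # A numeric run sets 'pending' afresh (runs are maximal, so the accumulator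
--     # is always 0 when a run starts); a non-numeric run emits (pending, first
--     # char) and (0, c) for every further char of the run.
--     s = directions_descr
--     n = len(s)
--     out = []
--     pending = 0
--     i = 0
--     while i < n:
--         j = i
--         if s[i].isnumeric():
--             v = 0
--             while j < n and s[j].isnumeric():
--                 v = v * 10 + int(s[j])
--                 j += 1
--             pending = v
--         else:
--             while j < n and not s[j].isnumeric():
--                 j += 1
--             out.append((pending, s[i]))
--             out.extend((0, c) for c in s[i + 1:j])
--             pending = 0
--         i = j
--     out.append((pending, "X"))
--     return out
-- ===== Notes on version B (the rewrite author's own statement) =====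
-- stated objective: alternative
-- what changed: B replaces A's single per-character scan with a running digit accumulator by a run-based pass: it splits the string into maximal numeric/non-numeric runs, sets the pending step count afresh per numeric run, and emits a whole non-numeric run at once ((pending, first char) then (0, c) for the rest).
import Mathlib
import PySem

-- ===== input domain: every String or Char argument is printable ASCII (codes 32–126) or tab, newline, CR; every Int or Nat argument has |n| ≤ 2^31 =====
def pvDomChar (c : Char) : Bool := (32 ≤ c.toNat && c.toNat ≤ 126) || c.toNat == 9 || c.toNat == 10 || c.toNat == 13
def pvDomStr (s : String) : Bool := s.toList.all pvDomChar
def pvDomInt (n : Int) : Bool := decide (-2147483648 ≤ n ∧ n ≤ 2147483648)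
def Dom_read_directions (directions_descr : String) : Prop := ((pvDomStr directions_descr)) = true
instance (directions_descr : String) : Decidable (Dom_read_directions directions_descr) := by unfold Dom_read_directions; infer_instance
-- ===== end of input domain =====

-- B replaces A's per-character running-accumulator scan by a run-based pass (maximal
-- numeric / non-numeric runs, with a different emission shape); objective: alternative.

-- int(c) for a single numeric character; on Dom (ASCII) the numeric characters are
-- exactly '0'..'9', where this is exact. Also, on Dom str.isnumeric coincides with
-- PySem.Chars.isdigit, which both ports use.
def pvDigitVal (c : Char) : Int := (c.toNat : Int) - 48

-- ===== PORT A =====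
-- A's while loop over indices, as structural recursion over the characters with the
-- same state (directions list so far, steps accumulator).
def readA_go : List Char → List (Int × String) → Int → List (Int × String)
  | [], dirs, steps => dirs ++ [(steps, "X")]
  | c :: rest, dirs, steps =>
    if PySem.Chars.isdigit c then
      readA_go rest dirs (steps * 10 + pvDigitVal c)
    else
      readA_go rest (dirs ++ [(steps, String.ofList [c])]) 0

def read_directions (directions_descr : String) : List (Int × String) :=
  readA_go directions_descr.toList [] 0

-- ===== PORT B =====
-- Source B's inner 'while j < n and s[j].isnumeric(): v = v*10 + int(s[j])' over a run.
def pvRunVal (run : List Char) : Int :=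
  run.foldl (fun v c => v * 10 + pvDigitVal c) 0

-- Source B's outer while loop: each step consumes one maximal run (takeWhile/dropWhile
-- are the inner j-scans); the non-numeric branch emits (pending, first char) and
-- (0, c) for the rest of the run in one go.
def readB_go : List Char → Int → List (Int × String)
  | [], pending => [(pending, "X")]
  | c :: rest, pending =>
    if PySem.Chars.isdigit c then
      readB_go (rest.dropWhile PySem.Chars.isdigit)
        (pvRunVal (c :: rest.takeWhile PySem.Chars.isdigit))
    else
      (pending, String.ofList [c]) ::
        ((rest.takeWhile (fun x => !PySem.Chars.isdigit x)).map
          (fun d => ((0 : Int), String.ofList [d])) ++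
         readB_go (rest.dropWhile (fun x => !PySem.Chars.isdigit x)) 0)
  termination_by cs _ => cs.length
  decreasing_by
  · simpa using Nat.lt_succ_of_le (List.length_dropWhile_le _ _)
  · simpa using Nat.lt_succ_of_le (List.length_dropWhile_le _ _)

def read_directions_alt (directions_descr : String) : List (Int × String) :=
  readB_go directions_descr.toList 0

-- ===== PRECONDITION & SPEC =====
def Spec_read_directions (directions_descr : String) (out : List (Int × String)) : Prop := out = read_directions_alt directions_descr
instance (directions_descr : String) (out : List (Int × String)) : Decidable (Spec_read_directions directions_descr out) := by unfold Spec_read_directions; infer_instance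

-- ===== CLAIM (what is proved, stated in full; the proofs are below) =====
def Claim_equal_read_directions : Prop := ∀ (directions_descr : String), Dom_read_directions directions_descr → Spec_read_directions directions_descr (read_directions directions_descr)

-- ===== LEMMAS AND PROOFS =====

-- Accumulator-free restatement of A's loop (proof helper only).
def readE : List Char → Int → List (Int × String)
  | [], steps => [(steps, "X")]
  | c :: rest, steps =>
    if PySem.Chars.isdigit c then
      readE rest (steps * 10 + pvDigitVal c)
    else
      (steps, String.ofList [c]) :: readE rest 0

theorem readA_go_eq_readE (cs : List Char) :
    ∀ dirs steps, readA_go cs dirs steps = dirs ++ readE cs steps := by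
  induction cs with
  | nil => intro dirs steps; simp [readA_go, readE]
  | cons c rest ih =>
      intro dirs steps
      by_cases h : PySem.Chars.isdigit c
      · simp [readA_go, readE, h, ih]
      · simp [readA_go, readE, h, ih]

theorem readE_digit_run (rs : List Char) :
    ∀ cs p, (∀ c ∈ rs, PySem.Chars.isdigit c) →
      readE (rs ++ cs) p =
        readE cs (rs.foldl (fun v c => v * 10 + pvDigitVal c) p) := by
  induction rs with
  | nil => intro cs p _; simp
  | cons r rs ih =>
      intro cs p h
      have hr : PySem.Chars.isdigit r := h r (by simp)
      simp only [List.cons_append, readE, hr, if_pos, List.foldl_cons]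
      exact ih cs _ (fun c hc => h c (by simp [hc]))

theorem readE_nondigit_run (rs : List Char) :
    ∀ cs, (∀ c ∈ rs, ¬ PySem.Chars.isdigit c) →
      readE (rs ++ cs) 0 =
        rs.map (fun d => ((0 : Int), String.ofList [d])) ++ readE cs 0 := by
  induction rs with
  | nil => intro cs _; simp
  | cons r rs ih =>
      intro cs h
      have hr : ¬ PySem.Chars.isdigit r := h r (by simp)
      simp only [List.cons_append, readE, hr, List.map_cons]
      simp [ih cs (fun c hc => h c (by simp [hc]))]

theorem readE_eq_readB_go (cs : List Char) (p : Int)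
    (hp : ∀ c cs', cs = c :: cs' → PySem.Chars.isdigit c → p = 0) :
    readE cs p = readB_go cs p := by
  induction cs, p using readB_go.induct with
  | case1 p => simp [readE, readB_go]
  | case2 c rest p h ih =>
      have hp0 : p = 0 := hp c rest rfl h
      subst hp0
      have hsplit : c :: rest =
          (c :: rest.takeWhile PySem.Chars.isdigit) ++
            rest.dropWhile PySem.Chars.isdigit := by
        simp [List.takeWhile_append_dropWhile]
      rw [hsplit, readE_digit_run _ _ _ ?hall]
      case hall =>
        intro x hx
        rcases List.mem_cons.mp hx with h1 | h1
        · simpa [h1] using h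
        · exact List.mem_takeWhile_imp h1
      have hnd : ∀ d ds, rest.dropWhile PySem.Chars.isdigit = d :: ds →
          PySem.Chars.isdigit d = true →
          pvRunVal (c :: rest.takeWhile PySem.Chars.isdigit) = 0 := by
        intro d ds hd hdig
        exfalso
        have := List.head?_dropWhile_not PySem.Chars.isdigit rest
        rw [hd] at this; simp [hdig] at this
      have hB : readB_go (c :: rest) 0 =
          readB_go (rest.dropWhile PySem.Chars.isdigit)
            (pvRunVal (c :: rest.takeWhile PySem.Chars.isdigit)) := by
        rw [readB_go.eq_def]; simp [h]
      rw [← hsplit, hB, ← ih hnd]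
      simp [pvRunVal]
  | case3 c rest p h ih =>
      have hsplit : rest =
          rest.takeWhile (fun x => !PySem.Chars.isdigit x) ++
            rest.dropWhile (fun x => !PySem.Chars.isdigit x) := by
        simp [List.takeWhile_append_dropWhile]
      rw [readE]
      simp only [h, if_neg, Bool.not_eq_true]
      rw [readB_go]
      simp only [h, if_neg, Bool.not_eq_true]
      congr 1
      calc readE rest 0
          = readE (rest.takeWhile (fun x => !PySem.Chars.isdigit x) ++
              rest.dropWhile (fun x => !PySem.Chars.isdigit x)) 0 := by rw [← hsplit]
        _ = (rest.takeWhile (fun x => !PySem.Chars.isdigit x)).map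
              (fun d => ((0 : Int), String.ofList [d])) ++
            readE (rest.dropWhile (fun x => !PySem.Chars.isdigit x)) 0 := by
              apply readE_nondigit_run
              intro x hx
              have := List.mem_takeWhile_imp hx
              simpa using this
        _ = _ := by rw [ih (fun _ _ _ _ => rfl)]

-- ===== VERDICT (by name: the statement is the Claim_ definition above) =====
theorem read_directions_spec : Claim_equal_read_directions := by
  intro s _
  unfold Spec_read_directions read_directions read_directions_alt
  rw [readA_go_eq_readE, readE_eq_readB_go]
  · simp
  · intro _ _ _ _; rfl
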